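-- pv_equiv track=rewrite | github.com/preludeofme/higgs-audio | webui/app_gradio.py | _pop_segment
-- ===== SOURCE A (Python) =====
-- def _pop_segment(buf: str, min_chars: int, max_chars: int) -> tuple[str, str]:
--     """Return (segment, remainder) if a segment boundary is found, else ("", buf)."""
--     if len(buf) < min_chars:
--         return "", buf
--     # Prefer punctuation boundary
--     m = None
--     for punct in [".", "!", "?", "。", "！", "？", ";", ":", ","]:
--         idx = buf.rfind(punct, 0, max(min(len(buf), max_chars) + 1, 0))
--         if idx != -1 and idx + 1 >= min_chars:
--             m = idx + 1
--             break
--     if m is None and len(buf) >= max_chars: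
--         m = max_chars
--     if m is None:
--         return "", buf
--     seg = buf[:m].strip()
--     rem = buf[m:]
--     return seg, rem
-- ===== SOURCE B (Python) =====
-- _PRIO = {".": 0, "!": 1, "?": 2, "。": 3, "！": 4, "？": 5, ";": 6, ":": 7, ",": 8}
--
-- def _pop_segment(buf: str, min_chars: int, max_chars: int) -> tuple[str, str]:
--     """Return (segment, remainder) if a segment boundary is found, else ("", buf)."""
--     if len(buf) < min_chars:
--         return "", buf
--     # Single right-to-left scan of the eligible index window [lo, end):
--     # keep the best (lowest-numbered) priority punctuation seen; ties go to the
--     # rightmost occurrence, which is seen first.  Positions below lo can never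
--     # satisfy idx + 1 >= min_chars, so they are skipped outright.
--     end = min(max(min(len(buf), max_chars) + 1, 0), len(buf))
--     lo = max(min_chars - 1, 0)
--     best = None  # (priority rank, index)
--     for i in reversed(range(lo, end)):
--         r = _PRIO.get(buf[i])
--         if r is not None and (best is None or r < best[0]):
--             best = (r, i)
--             if r == 0:
--                 break  # '.' is top priority; nothing can beat it
--     if best is not None:
--         m = best[1] + 1
--     elif len(buf) >= max_chars:
--         m = max_chars
--     else:
--         return "", buf
--     return buf[:m].strip(), buf[m:]
-- ===== Notes on version B (the rewrite author's own statement) =====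
-- stated objective: alternative
-- what changed: Replaces A's nine independent right-to-left rfind scans (one per punctuation, in priority order) by a single right-to-left scan of the eligible index window [max(min_chars-1,0), end) that keeps the best-priority punctuation seen so far (ties to the rightmost, with an early break on '.'), eliminating the per-punctuation passes.
import Mathlib
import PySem

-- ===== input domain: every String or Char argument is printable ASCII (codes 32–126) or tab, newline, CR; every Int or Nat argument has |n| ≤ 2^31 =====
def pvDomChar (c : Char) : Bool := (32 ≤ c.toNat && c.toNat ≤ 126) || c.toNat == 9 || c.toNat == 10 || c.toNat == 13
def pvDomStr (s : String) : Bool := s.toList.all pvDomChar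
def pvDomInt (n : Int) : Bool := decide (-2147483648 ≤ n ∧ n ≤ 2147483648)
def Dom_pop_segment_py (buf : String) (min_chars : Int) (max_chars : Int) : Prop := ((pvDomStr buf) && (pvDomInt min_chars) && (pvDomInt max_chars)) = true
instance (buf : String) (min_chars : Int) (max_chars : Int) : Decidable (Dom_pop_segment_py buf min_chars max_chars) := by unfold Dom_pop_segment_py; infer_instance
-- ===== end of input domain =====

-- B replaces A's nine per-punctuation right-to-left rfind scans by ONE right-to-left scan of the
-- eligible index window [max(min_chars-1,0), end) that keeps the best-priority punctuation seen
-- (ties to the rightmost); same results, a different traversal (alternative decomposition).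

-- the punctuation priority list, shared verbatim by both Pythons
def pvPuncts : List Char := ['.', '!', '?', '。', '！', '？', ';', ':', ',']

-- ===== PORT A =====
-- A's `for punct in [...]` loop with `rfind` and early break
def pvFindA (bl : List Char) (e min_chars : Int) : List Char → Option Int
  | [] => none
  | c :: rest =>
    let idx := PySem.Chars.rfindFrom bl [c] 0 (some e)
    if idx ≠ -1 ∧ min_chars ≤ idx + 1 then some (idx + 1) else pvFindA bl e min_chars rest

def pop_segment_py (buf : String) (min_chars : Int) (max_chars : Int) : String × String :=
  let bl := buf.toList
  if (bl.length : Int) < min_chars then ("", buf)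
  else
    let m := pvFindA bl (max (min (bl.length : Int) max_chars + 1) 0) min_chars pvPuncts
    let m := if m = none ∧ max_chars ≤ (bl.length : Int) then some max_chars else m
    match m with
    | none => ("", buf)
    | some m =>
      (String.ofList (PySem.Chars.strip (PySem.Chars.slice bl none (some m))),
       String.ofList (PySem.Chars.slice bl (some m) none))

-- ===== PORT B =====
-- the _PRIO dict literal of Source B
def pvPrioDict : PySem.Dict Char Int :=
  PySem.Dict.ofList [('.', 0), ('!', 1), ('?', 2), ('。', 3), ('！', 4), ('？', 5), (';', 6), (':', 7), (',', 8)]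

-- B's `for i in reversed(range(lo, end))` loop with the `break` at rank 0;
-- `buf[i]` is PySem.List.pyGet? (always in range here, so the `none` arm is unreachable)
def pvScanB (bl : List Char) : List Int → Option (Int × Int) → Option (Int × Int)
  | [], best => best
  | i :: rest, best =>
    let r := match PySem.List.pyGet? bl i with
             | some ch => pvPrioDict.get? ch
             | none => none
    match r with
    | some rv =>
      if (match best with | none => true | some b => decide (rv < b.1)) then
        if rv = 0 then some (rv, i) else pvScanB bl rest (some (rv, i))
      else pvScanB bl rest best
    | none => pvScanB bl rest best

def pop_segment_py_alt (buf : String) (min_chars : Int) (max_chars : Int) : String × String :=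
  let bl := buf.toList
  if (bl.length : Int) < min_chars then ("", buf)
  else
    let e := min (max (min (bl.length : Int) max_chars + 1) 0) (bl.length : Int)
    let lo := max (min_chars - 1) 0
    let best := pvScanB bl ((PySem.List.pyRange lo e 1).reverse) none
    match best with
    | some b =>
      (String.ofList (PySem.Chars.strip (PySem.Chars.slice bl none (some (b.2 + 1)))),
       String.ofList (PySem.Chars.slice bl (some (b.2 + 1)) none))
    | none =>
      if max_chars ≤ (bl.length : Int) then
        (String.ofList (PySem.Chars.strip (PySem.Chars.slice bl none (some max_chars))),
         String.ofList (PySem.Chars.slice bl (some max_chars) none))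
      else ("", buf)

-- ===== PRECONDITION & SPEC =====
def Spec_pop_segment_py (buf : String) (min_chars : Int) (max_chars : Int) (out : String × String) : Prop := out = pop_segment_py_alt buf min_chars max_chars
instance (buf : String) (min_chars : Int) (max_chars : Int) (out : String × String) : Decidable (Spec_pop_segment_py buf min_chars max_chars out) := by unfold Spec_pop_segment_py; infer_instance

-- ===== CLAIM (what is proved, stated in full; the proofs are below) =====
def Claim_equal_pop_segment_py : Prop := ∀ (buf : String) (min_chars : Int) (max_chars : Int), Dom_pop_segment_py buf min_chars max_chars → Spec_pop_segment_py buf min_chars max_chars (pop_segment_py buf min_chars max_chars)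

-- ===== LEMMAS AND PROOFS =====

-- index (from 0) of the last occurrence of c in w, or -1
def pvLastOcc : List Char → Char → Int
  | [], _ => -1
  | x :: xs, c =>
    let r := pvLastOcc xs c
    if r = -1 then (if x = c then 0 else -1) else r + 1

theorem pvLastOcc_ge (w : List Char) (c : Char) : -1 ≤ pvLastOcc w c := by
  induction w with
  | nil => simp [pvLastOcc]
  | cons x xs ih => simp only [pvLastOcc]; split_ifs <;> omega

theorem pvLastOcc_lt (w : List Char) (c : Char) : pvLastOcc w c < w.length := by
  induction w with
  | nil => simp [pvLastOcc]
  | cons x xs ih => simp only [pvLastOcc, List.length_cons]; split_ifs <;> push_cast <;> omega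

theorem pvLastOcc_append_singleton (v : List Char) (x c : Char) :
    pvLastOcc (v ++ [x]) c = if x = c then (v.length : Int) else pvLastOcc v c := by
  induction v with
  | nil => simp [pvLastOcc]
  | cons y v ih =>
    have h := pvLastOcc_ge v c
    by_cases hx : x = c
    · simp only [List.cons_append, pvLastOcc, ih, if_pos hx, List.length_cons]
      split_ifs <;> first | omega | exact False.elim (by assumption)
    · simp only [List.cons_append, pvLastOcc, ih, if_neg hx]

theorem pvLastOcc_append (u v : List Char) (c : Char) :
    pvLastOcc (u ++ v) c
      = if pvLastOcc v c = -1 then pvLastOcc u c else (u.length : Int) + pvLastOcc v c := by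
  induction u with
  | nil =>
    simp only [List.nil_append, List.length_nil, Nat.cast_zero, zero_add]
    split_ifs with h
    · rw [h]; rfl
    · rfl
  | cons a u ih =>
    have h1 := pvLastOcc_ge (u ++ v) c
    have h2 := pvLastOcc_ge v c
    have h3 := pvLastOcc_ge u c
    simp only [List.cons_append, pvLastOcc, ih, List.length_cons]
    split_ifs <;> push_cast <;> omega

theorem pv_go_eq (w : List Char) (c : Char) :
    ∀ j, PySem.Chars.rfind.go w [c] j = pvLastOcc (w.take (j + 1)) c := by
  intro j
  induction j with
  | zero =>
    cases w with
    | nil => simp [PySem.Chars.rfind.go, pvLastOcc, List.isPrefixOf]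
    | cons x xs =>
      simp only [PySem.Chars.rfind.go, List.take_succ_cons, List.take_zero, pvLastOcc,
        List.isPrefixOf, Bool.and_true]
      by_cases h : x = c
      · simp [h]
      · simp [h, Ne.symm h, beq_iff_eq]
  | succ j ih =>
    by_cases h : j + 1 < w.length
    · have hd : w.drop (j + 1) = w[j + 1] :: w.drop (j + 2) := List.drop_eq_getElem_cons h
      have ht : w.take (j + 2) = w.take (j + 1) ++ [w[j + 1]] := by
        rw [List.take_succ, List.getElem?_eq_getElem h]; rfl
      simp only [PySem.Chars.rfind.go, hd, ht, List.isPrefixOf, Bool.and_true,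
        pvLastOcc_append_singleton, ih, List.length_take]
      by_cases hc : w[j + 1] = c
      · simp [hc, Nat.min_eq_left (Nat.le_of_lt h)]
      · simp [hc, Ne.symm hc, beq_iff_eq]
    · have hd : w.drop (j + 1) = [] := List.drop_eq_nil_of_le (by omega)
      have ht : w.take (j + 2) = w.take (j + 1) := by
        rw [List.take_of_length_le (by omega), List.take_of_length_le (by omega)]
      simp only [PySem.Chars.rfind.go, hd, ht, ih, List.isPrefixOf]
      simp

theorem pv_rfind_single (w : List Char) (c : Char) :
    PySem.Chars.rfind w [c] = pvLastOcc w c := by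
  unfold PySem.Chars.rfind
  rw [pv_go_eq, List.take_of_length_le (by omega)]

theorem pv_rfindFrom_single (w : List Char) (c : Char) (e : Int) (he : 0 ≤ e) :
    PySem.Chars.rfindFrom w [c] 0 (some e) = pvLastOcc (w.take e.toNat) c := by
  have hge := pvLastOcc_ge (w.take e.toNat) c
  have hmin : (if (w.length : Int) < e then (w.length : Int)
      else if e < 0 then (if e + (w.length : Int) < 0 then 0 else e + (w.length : Int)) else e)
      = min (w.length : Int) e := by
    split_ifs <;> omega
  simp only [PySem.Chars.rfindFrom, hmin, lt_self_iff_false, if_false]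
  rw [if_neg (show ¬ min (w.length : Int) e < 0 by omega)]
  have hx : List.take (min (w.length : Int) e).toNat w = List.take e.toNat w := by
    rcases le_total (w.length : Int) e with hle | hle
    · rw [min_eq_left hle, List.take_of_length_le (by omega), List.take_of_length_le (by omega)]
    · rw [min_eq_right hle]
  simp only [Int.toNat_zero, List.drop_zero, hx, pv_rfind_single]
  split_ifs <;> omega

-- position (offset r0) of the first occurrence of x in a char list
def pvPosIn : List Char → Int → Char → Option Int
  | [], _, _ => none
  | c :: cs, r, x => if c = x then some r else pvPosIn cs (r + 1) x

-- (rank, last-occurrence index) of the first punct of cs occurring in u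
def pvRankFind : List Char → Int → List Char → Option (Int × Int)
  | [], _, _ => none
  | c :: cs, r, u => if pvLastOcc u c = -1 then pvRankFind cs (r + 1) u else some (r, pvLastOcc u c)

def pvMerge : Option (Int × Int) → Option (Int × Int) → Option (Int × Int)
  | b, none => b
  | none, some c => some c
  | some b, some c => if c.1 < b.1 then some c else some b

theorem pvPosIn_ge (cs : List Char) : ∀ r0 x r, pvPosIn cs r0 x = some r → r0 ≤ r := by
  induction cs with
  | nil => intro r0 x r h; simp [pvPosIn] at h
  | cons c cs ih =>
    intro r0 x r h
    simp only [pvPosIn] at h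
    split_ifs at h with hc
    · simp only [Option.some.injEq] at h; omega
    · have := ih (r0 + 1) x r h; omega

theorem pvRankFind_ge (cs : List Char) :
    ∀ r0 u b, pvRankFind cs r0 u = some b → r0 ≤ b.1 ∧ 0 ≤ b.2 := by
  induction cs with
  | nil => intro r0 u b h; simp [pvRankFind] at h
  | cons c cs ih =>
    intro r0 u b h
    have hge := pvLastOcc_ge u c
    simp only [pvRankFind] at h
    split_ifs at h with hc
    · have := ih (r0 + 1) u b h; omega
    · cases h; exact ⟨le_rfl, by omega⟩

theorem pvRankFind_nil (cs : List Char) : ∀ r0, pvRankFind cs r0 [] = none := by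
  induction cs with
  | nil => intro r0; rfl
  | cons c cs ih => intro r0; simp [pvRankFind, pvLastOcc, ih]

-- one right-append step of the first-present-punct computation
def pvStep (px : Option Int) (F : Option (Int × Int)) (n : Int) : Option (Int × Int) :=
  match px, F with
  | none, F => F
  | some r, none => some (r, n)
  | some r, some b => if r ≤ b.1 then some (r, n) else some b

theorem pvRankFind_append (u : List Char) (x : Char) (cs : List Char) :
    ∀ r0, pvRankFind cs r0 (u ++ [x])
      = pvStep (pvPosIn cs r0 x) (pvRankFind cs r0 u) (u.length : Int) := by
  induction cs with
  | nil => intro r0; simp [pvRankFind, pvPosIn, pvStep]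
  | cons c cs ih =>
    intro r0
    have hge := pvLastOcc_ge u c
    by_cases hx : c = x
    · subst hx
      have hpos : pvPosIn (c :: cs) r0 c = some r0 := by simp [pvPosIn]
      have h1 : pvLastOcc (u ++ [c]) c = (u.length : Int) := by
        rw [pvLastOcc_append_singleton, if_pos rfl]
      have hL : pvRankFind (c :: cs) r0 (u ++ [c]) = some (r0, (u.length : Int)) := by
        simp [pvRankFind, h1, show ((u.length : Int)) ≠ -1 by omega]
      rw [hpos, hL]
      by_cases h2 : pvLastOcc u c = -1
      · have hR : pvRankFind (c :: cs) r0 u = pvRankFind cs (r0 + 1) u := by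
          simp [pvRankFind, h2]
        rw [hR]
        cases hF : pvRankFind cs (r0 + 1) u with
        | none => rfl
        | some b =>
          have hb := pvRankFind_ge cs (r0 + 1) u b hF
          simp only [pvStep]
          rw [if_pos (by omega)]
      · have hR : pvRankFind (c :: cs) r0 u = some (r0, pvLastOcc u c) := by
          simp [pvRankFind, h2]
        rw [hR]
        simp only [pvStep]
        rw [if_pos (by simp)]
    · have hpos : pvPosIn (c :: cs) r0 x = pvPosIn cs (r0 + 1) x := by simp [pvPosIn, hx]
      have h1 : pvLastOcc (u ++ [x]) c = pvLastOcc u c := by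
        rw [pvLastOcc_append_singleton, if_neg (fun h => hx h.symm)]
      rw [hpos]
      by_cases h2 : pvLastOcc u c = -1
      · have hL : pvRankFind (c :: cs) r0 (u ++ [x]) = pvRankFind cs (r0 + 1) (u ++ [x]) := by
          simp [pvRankFind, h1, h2]
        have hR : pvRankFind (c :: cs) r0 u = pvRankFind cs (r0 + 1) u := by
          simp [pvRankFind, h2]
        rw [hL, hR, ih (r0 + 1)]
      · have hL : pvRankFind (c :: cs) r0 (u ++ [x]) = some (r0, pvLastOcc u c) := by
          simp [pvRankFind, h1, h2]
        have hR : pvRankFind (c :: cs) r0 u = some (r0, pvLastOcc u c) := by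
          simp [pvRankFind, h2]
        rw [hL, hR]
        cases hP : pvPosIn cs (r0 + 1) x with
        | none => rfl
        | some r =>
          have hr := pvPosIn_ge cs (r0 + 1) x r hP
          simp only [pvStep]
          rw [if_neg (by omega)]

-- the literal dict lookup is the position in the priority list
theorem pvPrio_eq (x : Char) : pvPrioDict.get? x = pvPosIn pvPuncts 0 x := by
  have h : pvPrioDict = PySem.Dict.mk [('.', 0), ('!', 1), ('?', 2), ('\u3002', 3), ('\uFF01', 4), ('\uFF1F', 5), (';', 6), (':', 7), (',', 8)] := by decide
  rw [h]
  simp only [PySem.Dict.get?_mk_cons, pvPuncts, pvPosIn, beq_iff_eq]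
  norm_num
  split_ifs <;> rfl

-- A's punct loop computes the first punct present in the sub-window, +1 shifted
theorem pvFindA_eq (bl : List Char) (e min_chars lo : Int)
    (he : 0 ≤ e) (hlo : lo = max (min_chars - 1) 0) :
    ∀ cs r0, pvFindA bl e min_chars cs
      = (pvRankFind cs r0 ((bl.take e.toNat).drop lo.toNat)).map (fun b => lo + b.2 + 1) := by
  intro cs
  induction cs with
  | nil => intro r0; rfl
  | cons c cs ih =>
    intro r0
    set w := bl.take e.toNat with hw
    set sub := w.drop lo.toNat with hsub
    have hsplit : w = w.take lo.toNat ++ sub := (List.take_append_drop _ _).symm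
    have hocc : pvLastOcc w c
        = if pvLastOcc sub c = -1 then pvLastOcc (w.take lo.toNat) c
          else ((w.take lo.toNat).length : Int) + pvLastOcc sub c := by
      conv_lhs => rw [hsplit]
      exact pvLastOcc_append _ _ _
    have hgeP := pvLastOcc_ge (w.take lo.toNat) c
    have hltP := pvLastOcc_lt (w.take lo.toNat) c
    have hgeS := pvLastOcc_ge sub c
    have hlenP : (w.take lo.toNat).length = min lo.toNat w.length := List.length_take
    simp only [pvFindA, pvRankFind, pv_rfindFrom_single bl c e he, ← hw, hocc]
    by_cases h2 : pvLastOcc sub c = -1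
    · rw [if_pos h2] at *
      rw [if_pos h2]
      have hcond : ¬ (pvLastOcc (w.take lo.toNat) c ≠ -1
          ∧ min_chars ≤ pvLastOcc (w.take lo.toNat) c + 1) := by
        rintro ⟨hne, hmc⟩
        -- any prefix occurrence lies below the window floor, so it cannot satisfy min_chars
        have hlt' : pvLastOcc (w.take lo.toNat) c < ((min lo.toNat w.length : Nat) : Int) := by
          rw [← hlenP]; exact_mod_cast hltP
        by_cases hm : min_chars ≤ 0
        · have hlo0 : lo = 0 := by omega
          rw [hlo0] at hlt'
          simp at hlt'
          omega
        · have hloeq : lo = min_chars - 1 := by omega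
          have : ((min lo.toNat w.length : Nat) : Int) ≤ lo := by push_cast; omega
          omega
      rw [if_neg hcond, ih (r0 + 1)]
    · rw [if_neg h2] at *
      rw [if_neg h2]
      have hsubne : sub ≠ [] := by
        intro hnil
        rw [hnil] at h2; simp [pvLastOcc] at h2
      have hlole : lo.toNat < w.length := by
        by_contra hcon
        exact hsubne (List.drop_eq_nil_of_le (by omega))
      have hLP : ((w.take lo.toNat).length : Int) = lo := by
        rw [hlenP]; push_cast; omega
      rw [hLP]
      have hcond : (lo + pvLastOcc sub c ≠ -1 ∧ min_chars ≤ lo + pvLastOcc sub c + 1) := by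
        constructor <;> omega
      rw [if_pos hcond]
      simp only [Option.map_some]

-- B's reverse scan over the window indices computes the best-priority punct (merge form)
theorem pvScanB_spec (bl : List Char) (lo : Int) (hlo : 0 ≤ lo) :
    ∀ (u : List Char),
      (∀ k (hk : k < u.length), PySem.List.pyGet? bl (lo + (k : Int)) = some u[k]) →
    ∀ best, pvScanB bl ((PySem.List.pyRange lo (lo + (u.length : Int)) 1).reverse) best
      = pvMerge best ((pvRankFind pvPuncts 0 u).map (fun b => (b.1, lo + b.2))) := by
  intro u
  induction u using List.reverseRecOn with
  | nil =>
    intro _ best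
    simp only [List.length_nil, Nat.cast_zero, add_zero]
    rw [PySem.List.pyRange_one_eq_nil (le_refl lo)]
    simp [pvScanB, pvRankFind_nil, pvMerge]
  | append_singleton u x ih =>
    intro h best
    have hlen : (lo + (((u ++ [x]).length : Nat) : Int)) = (lo + (u.length : Int)) + 1 := by
      simp; push_cast; ring
    rw [hlen, PySem.List.pyRange_one_succ_right (by omega), List.reverse_append]
    simp only [List.reverse_singleton, List.singleton_append]
    have hx : PySem.List.pyGet? bl (lo + (u.length : Int)) = some x := by
      have hx0 := h u.length (by simp)
      simpa using hx0
    have hI : ∀ best', pvScanB bl ((PySem.List.pyRange lo (lo + (u.length : Int)) 1).reverse) best'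
        = pvMerge best' ((pvRankFind pvPuncts 0 u).map (fun b => (b.1, lo + b.2))) :=
      ih (fun k hk => by
        have hk2 := h k (by simp; omega)
        simpa [List.getElem_append_left hk] using hk2)
    simp only [pvScanB, hx, pvPrio_eq x]
    have hRF := pvRankFind_append u x pvPuncts 0
    cases hP : pvPosIn pvPuncts 0 x with
    | none =>
      rw [hP] at hRF
      simp only [pvStep] at hRF
      rw [hRF]
      cases best with
      | none => rw [hI]
      | some b => rw [hI]
    | some rv =>
      rw [hP] at hRF
      have hrv0 : 0 ≤ rv := pvPosIn_ge pvPuncts 0 x rv hP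
      cases best with
      | none =>
        simp only [if_pos]
        by_cases hz : rv = 0
        · subst hz
          cases hF : pvRankFind pvPuncts 0 u with
          | none => rw [hF] at hRF; simp only [pvStep] at hRF; simp [hRF, pvMerge]
          | some b =>
            have hb := pvRankFind_ge pvPuncts 0 u b hF
            rw [hF] at hRF; simp only [pvStep] at hRF; rw [if_pos (by omega)] at hRF
            simp [hRF, pvMerge]
        · rw [if_neg hz, hI]
          cases hF : pvRankFind pvPuncts 0 u with
          | none => rw [hF] at hRF; simp only [pvStep] at hRF; simp [hRF, pvMerge]
          | some b =>
            have hb := pvRankFind_ge pvPuncts 0 u b hF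
            by_cases hle : rv ≤ b.1
            · rw [hF] at hRF; simp only [pvStep] at hRF; rw [if_pos hle] at hRF
              simp [hRF, pvMerge, show ¬ (b.1 < rv) by omega]
            · rw [hF] at hRF; simp only [pvStep] at hRF; rw [if_neg hle] at hRF
              simp [hRF, pvMerge, show b.1 < rv by omega]
      | some b0 =>
        by_cases hlt : rv < b0.1
        · simp only [hlt, decide_true, if_true]
          by_cases hz : rv = 0
          · subst hz
            cases hF : pvRankFind pvPuncts 0 u with
            | none => rw [hF] at hRF; simp only [pvStep] at hRF; simp [hRF, pvMerge, hlt]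
            | some b =>
              have hb := pvRankFind_ge pvPuncts 0 u b hF
              rw [hF] at hRF; simp only [pvStep] at hRF; rw [if_pos (by omega)] at hRF
              simp [hRF, pvMerge, hlt]
          · rw [if_neg hz, hI]
            cases hF : pvRankFind pvPuncts 0 u with
            | none => rw [hF] at hRF; simp only [pvStep] at hRF; simp [hRF, pvMerge, hlt]
            | some b =>
              have hb := pvRankFind_ge pvPuncts 0 u b hF
              by_cases hle : rv ≤ b.1
              · rw [hF] at hRF; simp only [pvStep] at hRF; rw [if_pos hle] at hRF
                simp [hRF, pvMerge, hlt, show ¬ (b.1 < rv) by omega]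
              · rw [hF] at hRF; simp only [pvStep] at hRF; rw [if_neg hle] at hRF
                simp [hRF, pvMerge, show b.1 < rv by omega, show b.1 < b0.1 by omega]
        · simp only [hlt, decide_false, Bool.false_eq_true, if_false]
          rw [hI]
          cases hF : pvRankFind pvPuncts 0 u with
          | none =>
            rw [hF] at hRF
            simp only [pvStep] at hRF
            simp [hRF, pvMerge, show ¬ (rv < b0.1) from hlt]
          | some b =>
            have hb := pvRankFind_ge pvPuncts 0 u b hF
            by_cases hle : rv ≤ b.1
            · rw [hF] at hRF; simp only [pvStep] at hRF; rw [if_pos hle] at hRF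
              simp [hRF, pvMerge, show ¬ (rv < b0.1) from hlt, show ¬ (b.1 < b0.1) by omega]
            · rw [hF] at hRF; simp only [pvStep] at hRF; rw [if_neg hle] at hRF
              simp [hRF, pvMerge]

-- ===== VERDICT (by name: the statement is the Claim_ definition above) =====
theorem pop_segment_py_spec : Claim_equal_pop_segment_py := by
  intro buf min_chars max_chars _
  unfold Spec_pop_segment_py pop_segment_py pop_segment_py_alt
  by_cases hshort : (buf.toList.length : Int) < min_chars
  · simp only [if_pos hshort]
  · simp only [if_neg hshort]
    set bl := buf.toList with hbl
    set e' := max (min (bl.length : Int) max_chars + 1) 0 with he'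
    set e := min e' (bl.length : Int) with he
    set lo := max (min_chars - 1) 0 with hlo
    have he'0 : 0 ≤ e' := le_max_right _ _
    have hlo0 : 0 ≤ lo := le_max_right _ _
    have he0 : 0 ≤ e := le_min he'0 (by positivity)
    set w := bl.take e'.toNat with hw
    set sub := w.drop lo.toNat with hsub
    have hwlen : (w.length : Int) = e := by
      rw [hw, List.length_take]; push_cast; omega
    have hdroplen : sub.length = w.length - lo.toNat := by
      rw [hsub]; exact List.length_drop
    have hrange : PySem.List.pyRange lo e 1 = PySem.List.pyRange lo (lo + (sub.length : Int)) 1 := by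
      by_cases hle : e ≤ lo
      · rw [PySem.List.pyRange_one_eq_nil hle, PySem.List.pyRange_one_eq_nil (by push_cast; omega)]
      · congr 1; push_cast; omega
    have hidx : ∀ k (hk : k < sub.length), PySem.List.pyGet? bl (lo + (k : Int)) = some sub[k] := by
      intro k hk
      have hklt : lo.toNat + k < w.length := by omega
      have hwle : w.length ≤ bl.length := by
        rw [hw, List.length_take]; omega
      have hkbl : lo.toNat + k < bl.length := by omega
      have h1 : sub[k] = w[lo.toNat + k]'hklt := by
        simp [hsub]
      have h2 : w[lo.toNat + k]'hklt = bl[lo.toNat + k]'hkbl := by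
        simp [hw]
      have hcast : lo + (k : Int) = ((lo.toNat + k : Nat) : Int) := by push_cast; omega
      rw [hcast, PySem.List.pyGet?_natCast, List.getElem?_eq_getElem hkbl, h1, h2]
    have hA := pvFindA_eq bl e' min_chars lo he'0 hlo pvPuncts 0
    have hB := pvScanB_spec bl lo hlo0 sub hidx none
    simp only [hA, hrange, hB]
    cases hF : pvRankFind pvPuncts 0 sub with
    | none =>
      by_cases hmx : max_chars ≤ (bl.length : Int)
      · simp [pvMerge, hmx]
      · simp [pvMerge, hmx]
    | some b =>
      have hb := pvRankFind_ge pvPuncts 0 sub b hF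
      simp [pvMerge, add_assoc]
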